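-- pv_equiv track=rewrite | github.com/recuraki/PythonJunkTest | atcoder/LeetCodeBi/50_d.py | makeStringSorted
-- ===== SOURCE A (Python) =====
-- def makeStringSorted(s: str) -> int:
--     m = 10**9 + 7
--     n = len(s)
--     res = 0
--     os = list(s)
--     s = list(s)
--     s.sort()
--     for i in range(n):
--         targetchar = os[i]
--         if s[i] == targetchar:
--             continue
--         cnt = 1
--         for j in range(i, n):
--             if s[j] == targetchar:
--                 cnt *= (n - j + 1)
--                 s[i], s[j] = s[j], s[i]
--                 cnt %= m
--                 break
--             if s[j] < targetchar:
--                 cnt *= (n - j + 1)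
--                 cnt %= m
--         res += cnt
--         res %= m
--     return res
-- ===== SOURCE B (Python) =====
-- def makeStringSorted(s: str) -> int:
--     M = 10**9 + 7
--     n = len(s)
--     pos = {}
--     for r, c in enumerate(sorted(s)):
--         pos.setdefault(c, []).append(r)
--     res = 0
--     for i, t in enumerate(s):
--         if i in pos[t]:
--             pos[t].remove(i)
--             continue
--         j = min(pos[t])
--         cnt = (n - j + 1) % M
--         for c, ps in pos.items():
--             if c < t:
--                 for q in ps:
--                     if q < j:
--                         cnt = cnt * (n - q + 1) % M
--         for c, ps in pos.items():
--             if i in ps: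
--                 ps[ps.index(i)] = j
--                 break
--         pos[t].remove(j)
--         res = (res + cnt) % M
--     return res
-- ===== Notes on version B (the rewrite author's own statement) =====
-- stated objective: alternative
-- what changed: B discards A's mutable character array and its inner slot-by-slot scan: it builds once a dict mapping each character to the list of slots holding it, finds the matched slot as min(pos[t]) instead of scanning, forms the count as a product over the position lists of all smaller characters (valid since the factors commute mod M), and performs A's swap as a slot relabel inside the dict.
import Mathlib
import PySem

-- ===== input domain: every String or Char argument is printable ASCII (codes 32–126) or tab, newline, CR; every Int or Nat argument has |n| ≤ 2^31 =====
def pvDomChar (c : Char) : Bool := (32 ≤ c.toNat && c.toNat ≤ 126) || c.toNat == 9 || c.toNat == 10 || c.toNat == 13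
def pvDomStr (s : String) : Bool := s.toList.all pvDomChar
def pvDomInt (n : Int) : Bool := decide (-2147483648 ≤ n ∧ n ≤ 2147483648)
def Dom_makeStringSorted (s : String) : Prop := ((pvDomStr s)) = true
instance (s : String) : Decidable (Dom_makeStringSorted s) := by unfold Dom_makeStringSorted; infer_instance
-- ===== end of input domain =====

-- B replaces A's mutable character array and inner slot scan by a dict from character to the
-- list of slots holding it (match slot = min of a list, count = product over the position lists
-- of smaller characters, swap = slot relabel); objective: alternative, same asymptotic cost.

-- ===== PORT A =====
-- inner loop of A: 'for j in range(i, n)' with break on s[j] == targetchar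
def pvALoop (n : Int) (t : Char) (i : Int) : List Int → Int → List Char → Int × List Char
  | [], cnt, s => (cnt, s)
  | j :: js, cnt, s =>
    match PySem.List.pyGet? s j with
    | none => (cnt, s)  -- unreachable: every j ∈ range(i, n) is a valid index of s
    | some cj =>
      if cj = t then
        -- cnt *= (n - j + 1); s[i], s[j] = s[j], s[i]; cnt %= m; break
        (PySem.Int.mod (cnt * (n - j + 1)) 1000000007,
         PySem.List.pySetD (PySem.List.pySetD s i cj) j (PySem.List.pyGetD s i ' '))
      else if cj < t then
        pvALoop n t i js (PySem.Int.mod (cnt * (n - j + 1)) 1000000007) s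
      else
        pvALoop n t i js cnt s

-- outer loop of A: 'for i in range(n)'
def pvAOuter (m n : Int) (os : List Char) : List Int → List Char → Int → Int
  | [], _, res => res
  | i :: is, s, res =>
    let targetchar := PySem.List.pyGetD os i ' '   -- os[i]; exact: i < n = len(os)
    if PySem.List.pyGetD s i ' ' = targetchar then -- s[i]; exact: i < n = len(s)
      pvAOuter m n os is s res
    else
      let p := pvALoop n targetchar i (PySem.List.pyRange i n 1) 1 s
      pvAOuter m n os is p.2 (PySem.Int.mod (res + p.1) m)

def makeStringSorted (s : String) : Int :=
  let m : Int := 1000000007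
  let n : Int := PySem.Str.len s
  pvAOuter m n s.toList (PySem.List.pyRange 0 n 1)
    (PySem.List.sorted s.toList (fun c => c) false) 0

-- ===== PORT B =====
-- build of pos: 'pos.setdefault(c, []).append(r)' over enumerate(sorted(s))
def pvBInit (l : List (Int × Char)) : PySem.Dict Char (List Int) :=
  l.foldl (fun d rc => d.modify rc.2 [] (fun v => v ++ [rc.1])) PySem.Dict.empty

-- outer loop of B: 'for i, t in enumerate(s)' carrying the slot dict
def pvBOuter (M n : Int) : List (Int × Char) → PySem.Dict Char (List Int) → Int → Int
  | [], _, res => res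
  | (i, t) :: rest, pos, res =>
    let pt := pos.getD t []
    if i ∈ pt then
      match PySem.List.remove? pt i with
      | none => res      -- unreachable: i ∈ pt
      | some pt' => pvBOuter M n rest (pos.insert t pt') res
    else
      match PySem.List.min? pt (fun q => q) with
      | none => res      -- unreachable: t always occurs in the remainder, min() never sees []
      | some j =>
        let cnt := pos.items.foldl
          (fun a cps => if cps.1 < t then
              cps.2.foldl (fun a q => if q < j then PySem.Int.mod (a * (n - q + 1)) M else a) a
            else a)
          (PySem.Int.mod (n - j + 1) M)
        let pos1 := match pos.items.find? (fun cps => decide (i ∈ cps.2)) with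
          | none => pos   -- unreachable: slot i always holds some character
          | some cps => match PySem.List.index? cps.2 i with
            | none => pos -- unreachable: i ∈ cps.2 where find? succeeded
            | some k => pos.insert cps.1 (cps.2.set k j)
        let pos2 := match PySem.List.remove? (pos1.getD t []) j with
          | none => pos1  -- unreachable: j = min(pos[t]) ∈ pos[t]
          | some l => pos1.insert t l
        pvBOuter M n rest pos2 (PySem.Int.mod (res + cnt) M)

def makeStringSorted_alt (s : String) : Int :=
  let M : Int := 1000000007
  let n : Int := PySem.Str.len s
  pvBOuter M n (PySem.List.enumerate s.toList 0)
    (pvBInit (PySem.List.enumerate (PySem.List.sorted s.toList (fun c => c) false) 0)) 0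

-- ===== PRECONDITION & SPEC =====
def Spec_makeStringSorted (s : String) (out : Int) : Prop := out = makeStringSorted_alt s
instance (s : String) (out : Int) : Decidable (Spec_makeStringSorted s out) := by unfold Spec_makeStringSorted; infer_instance

-- ===== CLAIM (what is proved, stated in full; the proofs are below) =====
def Claim_equal_makeStringSorted : Prop := ∀ (s : String), Dom_makeStringSorted s → Spec_makeStringSorted s (makeStringSorted s)

-- ===== LEMMAS AND PROOFS =====

-- Python's '%' with the positive modulus is Int.emod
lemma pv_modM (x : Int) : PySem.Int.mod x 1000000007 = x % 1000000007 :=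
  PySem.Int.mod_eq_emod_of_pos (by norm_num)

-- push one factor through a reduction mod m
lemma pv_mm (a f : Int) : (a % 1000000007 * f) % 1000000007 = a * f % 1000000007 := by
  rw [Int.mul_emod, Int.emod_emod_of_dvd _ (dvd_refl (1000000007 : Int)), ← Int.mul_emod]

-- the multiplicative step with the absolute position j (A's view: factor n - j + 1)
def pvAbsStep (n : Int) (t : Char) (cnt : Int) (jc : Int × Char) : Int :=
  if jc.2 < t then PySem.Int.mod (cnt * (n - jc.1 + 1)) 1000000007 else cnt

-- setting the element just past a known prefix
lemma pv_set_mid {α : Type} (l r : List α) (x v : α) : (l ++ x :: r).set l.length v = l ++ v :: r := by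
  rw [List.set_append_right _ _ (le_refl _)]
  simp

-- A's inner scan, characterised on the decomposition s = spre ++ P ++ t :: R with t ∉ P
lemma pvALoop_eq (n : Int) (t c0 : Char) (i0 : Nat) :
    ∀ (P : List Char), t ∉ P →
    ∀ (spre R : List Char) (cnt : Int),
      i0 < spre.length + P.length →
      (spre ++ P ++ t :: R)[i0]? = some c0 →
      n = ((spre ++ P ++ t :: R).length : Int) →
      pvALoop n t (i0 : Int) (PySem.List.pyRange ((spre.length : Nat) : Int) n 1) cnt (spre ++ P ++ t :: R)
        = (PySem.Int.mod (((PySem.List.enumerate P ((spre.length : Nat) : Int)).foldl (pvAbsStep n t) cnt)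
              * (n - (((spre.length + P.length : Nat)) : Int) + 1)) 1000000007,
           ((spre ++ P ++ t :: R).set i0 t).set (spre.length + P.length) c0) := by
  intro P
  induction P with
  | nil =>
    intro _ spre R cnt hi hget hn
    have hlt : ((spre.length : Nat) : Int) < n := by
      rw [hn]
      simp only [List.length_append, List.length_cons]
      push_cast
      omega
    rw [PySem.List.pyRange_one_cons hlt]
    simp only [pvALoop, List.append_nil] at *
    rw [PySem.List.pyGet?_append_length]
    simp [pysem, hget, PySem.List.enumerate_nil]
  | cons p P ih =>
    intro hnot spre R cnt hi hget hn
    have hp : p ≠ t := by intro h; exact hnot (by simp [h])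
    have hlt : ((spre.length : Nat) : Int) < n := by
      rw [hn]; simp only [List.length_append, List.length_cons]; push_cast; omega
    have hF : spre ++ (p :: P) ++ t :: R = (spre ++ [p]) ++ P ++ t :: R := by simp
    rw [PySem.List.pyRange_one_cons hlt]
    simp only [pvALoop]
    have hget2 : PySem.List.pyGet? (spre ++ (p :: P) ++ t :: R) ((spre.length : Nat) : Int)
        = some p := by
      rw [show spre ++ (p :: P) ++ t :: R = spre ++ p :: (P ++ t :: R) by simp]
      exact PySem.List.pyGet?_append_length _ _ _
    rw [hget2]
    simp only [if_neg hp]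
    have ihx := ih (fun hm => hnot (List.mem_cons_of_mem _ hm)) (spre ++ [p]) R
    simp only [List.length_append, List.length_cons, List.length_nil, Nat.cast_add,
      Nat.cast_one, zero_add] at ihx ⊢
    rw [← hF] at ihx
    by_cases hplt : p < t
    · rw [if_pos hplt]
      rw [ihx _ (by simp at hi ⊢; omega) hget (by rw [hn]; simp only [List.length_append, List.length_cons]; push_cast; ring)]
      rw [PySem.List.enumerate_cons, List.foldl_cons]
      simp only [pvAbsStep, if_pos hplt]
      have e1 : (spre.length : Int) + 1 + (P.length : Int) = (spre.length : Int) + ((P.length : Int) + 1) := by ring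
      have e2 : spre.length + 1 + P.length = spre.length + (P.length + 1) := by omega
      rw [e1, e2]
    · rw [if_neg hplt]
      rw [ihx _ (by simp at hi ⊢; omega) hget (by rw [hn]; simp only [List.length_append, List.length_cons]; push_cast; ring)]
      rw [PySem.List.enumerate_cons, List.foldl_cons]
      simp only [pvAbsStep, if_neg hplt]
      have e1 : (spre.length : Int) + 1 + (P.length : Int) = (spre.length : Int) + ((P.length : Int) + 1) := by ring
      have e2 : spre.length + 1 + P.length = spre.length + (P.length + 1) := by omega
      rw [e1, e2]

-- the slot lists B maintains, in specification form: positions of c in l, offset by i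
def pvOcc (c : Char) : Int → List Char → List Int
  | _, [] => []
  | i, x :: xs => if x = c then i :: pvOcc c (i+1) xs else pvOcc c (i+1) xs

lemma pvOcc_append (c : Char) (X Y : List Char) : ∀ (i : Int),
    pvOcc c i (X ++ Y) = pvOcc c i X ++ pvOcc c (i + X.length) Y := by
  induction X with
  | nil => intro i; simp [pvOcc]
  | cons x xs ih =>
    intro i
    simp only [List.cons_append, pvOcc, ih (i+1), List.length_cons]
    have h : i + 1 + (xs.length : Int) = i + ((xs.length : Int) + 1) := by ring
    push_cast
    rw [h]
    split_ifs <;> simp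

lemma pvOcc_cons_self (c : Char) (xs : List Char) (i : Int) :
    pvOcc c i (c :: xs) = i :: pvOcc c (i+1) xs := by simp [pvOcc]

lemma pvOcc_cons_ne (c x : Char) (xs : List Char) (i : Int) (h : x ≠ c) :
    pvOcc c i (x :: xs) = pvOcc c (i+1) xs := by simp [pvOcc, h]

lemma pvOcc_bounds (c : Char) : ∀ (l : List Char) (i q : Int),
    q ∈ pvOcc c i l → i ≤ q ∧ q < i + l.length := by
  intro l
  induction l with
  | nil => intro i q h; simp [pvOcc] at h
  | cons x xs ih =>
    intro i q h
    simp only [pvOcc] at h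
    split_ifs at h with hx
    · rcases List.mem_cons.mp h with rfl | h
      · simp only [List.length_cons]; push_cast; omega
      · have := ih (i+1) q h; simp at this ⊢; omega
    · have := ih (i+1) q h; simp at this ⊢; omega

lemma pvOcc_eq_nil_iff (c : Char) : ∀ (l : List Char) (i : Int), pvOcc c i l = [] ↔ c ∉ l := by
  intro l
  induction l with
  | nil => intro i; simp [pvOcc]
  | cons x xs ih =>
    intro i
    simp only [pvOcc]
    split_ifs with hx
    · simp [hx]
    · rw [ih]
      simp [Ne.symm hx]

lemma mem_pvOcc_head_iff (c x : Char) (xs : List Char) (i : Int) :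
    i ∈ pvOcc c i (x :: xs) ↔ x = c := by
  simp only [pvOcc]
  split_ifs with hx
  · simp [hx]
  · constructor
    · intro h; exact absurd (pvOcc_bounds c xs (i+1) i h).1 (by omega)
    · intro h; exact absurd h hx

-- filtering the occurrence list of an append below the split point keeps exactly the left part
lemma pvOcc_filter_lt (c : Char) (X Y : List Char) (i : Int) :
    (pvOcc c i (X ++ Y)).filter (fun q => decide (q < i + X.length)) = pvOcc c i X := by
  rw [pvOcc_append]
  rw [List.filter_append]
  have h1 : (pvOcc c i X).filter (fun q => decide (q < i + X.length)) = pvOcc c i X := by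
    apply List.filter_eq_self.mpr
    intro q hq
    have := (pvOcc_bounds c X i q hq).2
    simp; omega
  have h2 : (pvOcc c (i + X.length) Y).filter (fun q => decide (q < i + X.length)) = [] := by
    apply List.filter_eq_nil_iff.mpr
    intro q hq
    have := (pvOcc_bounds c Y (i + X.length) q hq).1
    simp; omega
  rw [h1, h2, List.append_nil]

-- B's inner per-list fold is (init * product of kept factors) mod M, for a reduced init
lemma pv_fold1 (n j : Int) : ∀ (L : List Int) (a : Int), a % 1000000007 = a →
    L.foldl (fun a q => if q < j then PySem.Int.mod (a * (n - q + 1)) 1000000007 else a) a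
      = (a * ((L.filter (fun q => decide (q < j))).map (fun q => n - q + 1)).prod) % 1000000007 := by
  intro L
  induction L with
  | nil => intro a ha; simpa using ha.symm
  | cons q L ih =>
    intro a ha
    simp only [List.foldl_cons, List.filter_cons]
    by_cases hq : q < j
    · simp only [hq, decide_true, if_true, List.map_cons, List.prod_cons]
      rw [ih _ (by rw [pv_modM]; exact Int.emod_emod_of_dvd _ (dvd_refl _))]
      rw [pv_modM, pv_mm, mul_assoc]
    · simp only [hq, decide_false, if_false]
      exact ih a ha

-- the fold over the dict items is (init * product over all kept slots) mod M
lemma pv_fold_items (n j : Int) (t : Char) :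
    ∀ (IT : List (Char × List Int)) (a : Int), a % 1000000007 = a →
    IT.foldl (fun a cps => if cps.1 < t then
        cps.2.foldl (fun a q => if q < j then PySem.Int.mod (a * (n - q + 1)) 1000000007 else a) a
      else a) a
      = (a * (((IT.filter (fun cps => decide (cps.1 < t))).flatMap
            (fun cps => cps.2.filter (fun q => decide (q < j)))).map (fun q => n - q + 1)).prod) % 1000000007 := by
  intro IT
  induction IT with
  | nil => intro a ha; simpa using ha.symm
  | cons cps IT ih =>
    intro a ha
    simp only [List.foldl_cons, List.filter_cons]
    by_cases hc : cps.1 < t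
    · simp only [hc, decide_true, if_true, List.flatMap_cons, List.map_append, List.prod_append]
      rw [pv_fold1 n j _ a ha]
      rw [ih _ (Int.emod_emod_of_dvd _ (dvd_refl _)), pv_mm, mul_assoc]
    · simp only [hc, decide_false, if_false]
      exact ih a ha

-- A's factor fold in the same product form
lemma pv_fold_abs (n : Int) (t : Char) :
    ∀ (E : List (Int × Char)) (a : Int), a % 1000000007 = a →
    E.foldl (pvAbsStep n t) a
      = (a * ((E.filter (fun p => decide (p.2 < t))).map (fun p => n - p.1 + 1)).prod) % 1000000007 := by
  intro E
  induction E with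
  | nil => intro a ha; simpa using ha.symm
  | cons p E ih =>
    intro a ha
    simp only [List.foldl_cons, List.filter_cons, pvAbsStep]
    by_cases hp : p.2 < t
    · simp only [hp, decide_true, if_true, List.map_cons, List.prod_cons]
      rw [ih _ (by rw [pv_modM]; exact Int.emod_emod_of_dvd _ (dvd_refl _))]
      rw [pv_modM, pv_mm, mul_assoc]
    · simp only [hp, decide_false, if_false]
      exact ih a ha

-- union over distinct characters of their occurrence lists = positions whose character is in the set
lemma pv_union (P : List Char) : ∀ (i : Int) (KS : List Char), KS.Nodup →
    (KS.flatMap (fun c => pvOcc c i P)).Perm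
      (((PySem.List.enumerate P i).filter (fun p => decide (p.2 ∈ KS))).map (·.1)) := by
  induction P with
  | nil =>
    intro i KS _
    simp [PySem.List.enumerate_nil, pvOcc]
  | cons x P ih =>
    intro i KS hnd
    rw [PySem.List.enumerate_cons]
    simp only [List.filter_cons]
    by_cases hx : x ∈ KS
    · simp only [hx, decide_true, if_true, List.map_cons]
      obtain ⟨K1, K2, rfl⟩ := List.append_of_mem hx
      have hsplit : x ∉ K1 ∧ x ∉ K2 := by
        have h := hnd; simp [List.nodup_append] at h
        exact ⟨fun hm => (h.2.2 x hm).1 rfl, h.2.1.1⟩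
      have e1 : K1.flatMap (fun c => pvOcc c i (x :: P)) = K1.flatMap (fun c => pvOcc c (i+1) P) :=
        List.flatMap_congr (fun c hc => by
          simp only [pvOcc]
          rw [if_neg (by rintro rfl; exact hsplit.1 hc)])
      have e2 : K2.flatMap (fun c => pvOcc c i (x :: P)) = K2.flatMap (fun c => pvOcc c (i+1) P) :=
        List.flatMap_congr (fun c hc => by
          simp only [pvOcc]
          rw [if_neg (by rintro rfl; exact hsplit.2 hc)])
      have e3 : pvOcc x i (x :: P) = i :: pvOcc x (i+1) P := by
        simp [pvOcc]
      rw [List.flatMap_append, List.flatMap_cons, e1, e2, e3]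
      have hmid : (K1.flatMap (fun c => pvOcc c (i+1) P) ++
            (i :: pvOcc x (i+1) P ++ K2.flatMap (fun c => pvOcc c (i+1) P))).Perm
          (i :: ((K1 ++ x :: K2).flatMap (fun c => pvOcc c (i+1) P))) := by
        rw [show (i :: pvOcc x (i+1) P ++ K2.flatMap (fun c => pvOcc c (i+1) P))
            = i :: (pvOcc x (i+1) P ++ K2.flatMap (fun c => pvOcc c (i+1) P)) from rfl]
        refine (List.perm_middle).trans ?_
        rw [List.flatMap_append, List.flatMap_cons]
      exact hmid.trans ((ih (i+1) (K1 ++ x :: K2) hnd).cons i)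
    · simp only [hx, decide_false]
      have e1 : KS.flatMap (fun c => pvOcc c i (x :: P)) = KS.flatMap (fun c => pvOcc c (i+1) P) :=
        List.flatMap_congr (fun c hc => by
          simp only [pvOcc]
          rw [if_neg (by rintro rfl; exact hx hc)])
      rw [e1]
      exact ih (i+1) KS hnd

-- main simultaneous induction: A's array loop = B's dict recursion
lemma pv_main (os : List Char) (n : Int) (hn : n = (os.length : Int)) :
    ∀ (osuf spre0 L : List Char) (pos : PySem.Dict Char (List Int)) (res : Int),
      os.drop spre0.length = osuf →
      spre0.length + L.length = os.length →
      osuf.Perm L →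
      pos.keys.Nodup →
      (∀ c : Char, (pos.getD c []).Perm (pvOcc c ((spre0.length : Nat) : Int) L)) →
      pvAOuter 1000000007 n os (PySem.List.pyRange ((spre0.length : Nat) : Int) n 1) (spre0 ++ L) res
        = pvBOuter 1000000007 n (PySem.List.enumerate osuf ((spre0.length : Nat) : Int)) pos res := by
  intro osuf
  induction osuf with
  | nil =>
    intro spre0 L pos res hdrop hlen hperm hnd hinv
    have hL : L = [] := List.eq_nil_of_length_eq_zero (by simpa using hperm.length_eq.symm)
    subst hL
    have hend : ((spre0.length : Nat) : Int) = n := by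
      rw [hn]; simp at hlen; omega
    rw [hend]
    simp [pysem, pvAOuter, pvBOuter]
  | cons t osrest ih =>
    intro spre0 L pos res hdrop hlen hperm hnd hinv
    obtain ⟨c0, Lt, rfl⟩ : ∃ c0 Lt, L = c0 :: Lt := by
      cases L with
      | nil => exact absurd hperm.length_eq (by simp)
      | cons a b => exact ⟨a, b, rfl⟩
    have hi_lt : ((spre0.length : Nat) : Int) < n := by
      rw [hn]; simp only [List.length_cons] at hlen; omega
    have hos : os[spre0.length]? = some t := by
      have h0 : (os.drop spre0.length)[0]? = some t := by rw [hdrop]; rfl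
      rw [List.getElem?_drop] at h0; simpa using h0
    have htc : PySem.List.pyGetD os ((spre0.length : Nat) : Int) ' ' = t := by
      simp [pysem, hos]
    have hsi : PySem.List.pyGetD (spre0 ++ c0 :: Lt) ((spre0.length : Nat) : Int) ' ' = c0 := by
      simp [pysem]
    have hdrop1 : os.drop (spre0.length + 1) = osrest := by
      have h1 := congrArg (List.drop 1) hdrop
      simpa [List.drop_drop, Nat.add_comm] using h1
    rw [PySem.List.pyRange_one_cons hi_lt, PySem.List.enumerate_cons]
    simp only [pvAOuter, pvBOuter, htc, hsi]
    by_cases hc0 : c0 = t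
    · -- continue branch: slot i already holds t
      subst hc0
      have hmem : ((spre0.length : Nat) : Int) ∈ pos.getD c0 [] :=
        (hinv c0).mem_iff.mpr ((mem_pvOcc_head_iff c0 c0 Lt _).mpr rfl)
      rw [if_pos rfl, if_pos hmem, PySem.List.remove?_eq_some_erase _ _ hmem]
      have hinv' : ∀ c : Char,
          (((pos.insert c0 ((pos.getD c0 []).erase ((spre0.length : Nat) : Int))).getD c []).Perm
            (pvOcc c (((spre0 ++ [c0]).length : Nat) : Int) Lt)) := by
        intro c
        have hlen1 : (((spre0 ++ [c0]).length : Nat) : Int) = ((spre0.length : Nat) : Int) + 1 := by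
          simp
        rw [hlen1]
        by_cases hct : c = c0
        · subst hct
          rw [PySem.Dict.getD_insert_self]
          have h2 := ((hinv c).erase ((spre0.length : Nat) : Int))
          have h3 : pvOcc c ((spre0.length : Nat) : Int) (c :: Lt)
              = ((spre0.length : Nat) : Int) :: pvOcc c (((spre0.length : Nat) : Int)+1) Lt := by
            simp [pvOcc]
          rw [h3] at h2
          simpa using h2
        · rw [PySem.Dict.getD_insert_of_ne _ _ _ hct]
          have h3 : pvOcc c ((spre0.length : Nat) : Int) (c0 :: Lt)
              = pvOcc c (((spre0.length : Nat) : Int)+1) Lt := by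
            simp only [pvOcc]
            rw [if_neg (by rintro rfl; exact hct rfl)]
          rw [← h3]
          exact hinv c
      have hstep := ih (spre0 ++ [c0]) Lt
        (pos.insert c0 ((pos.getD c0 []).erase ((spre0.length : Nat) : Int))) res
        (by simpa using hdrop1)
        (by simp at hlen ⊢; omega)
        hperm.cons_inv
        (PySem.Dict.nodup_keys_insert _ _ _ hnd)
        hinv'
      simpa using hstep
    · -- swap branch
      rw [if_neg hc0]
      have hnotmem : ((spre0.length : Nat) : Int) ∉ pos.getD t [] := by
        intro hmem
        exact hc0 ((mem_pvOcc_head_iff t c0 Lt _).mp ((hinv t).mem_iff.mp hmem))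
      rw [if_neg hnotmem]
      -- decompose Lt at the first occurrence of t
      have htmem : t ∈ c0 :: Lt := hperm.mem_iff.mp List.mem_cons_self
      obtain ⟨k, hk⟩ : ∃ k, PySem.List.index? (c0 :: Lt) t = some k :=
        Option.isSome_iff_exists.mp ((PySem.List.index?_isSome_iff _ _).mpr htmem)
      obtain ⟨pre, suf, hLdec, hklen, htpre⟩ := (PySem.List.index?_eq_some_iff _ _ _).mp hk
      obtain ⟨pre', rfl⟩ : ∃ pre', pre = c0 :: pre' := by
        cases pre with
        | nil => exact absurd (by simpa using hLdec.symm : t = c0 ∧ _) (by intro h; exact hc0 h.1.symm)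
        | cons a pre' =>
          have ha : c0 = a := by simpa using congrArg (fun l => l.headD c0) hLdec
          exact ⟨pre', by rw [ha]⟩
      have hLt : Lt = pre' ++ t :: suf := by simpa using hLdec
      -- the first-occurrence slot, as an Int
      have hjl : pvOcc t ((spre0.length : Nat) : Int) (c0 :: Lt)
          = (((spre0.length : Nat) : Int) + ((c0 :: pre').length : Int))
            :: pvOcc t ((((spre0.length : Nat) : Int) + ((c0 :: pre').length : Int)) + 1) suf := by
        rw [show c0 :: Lt = (c0 :: pre') ++ t :: suf by simp [hLt]]
        rw [pvOcc_append]
        rw [(pvOcc_eq_nil_iff t (c0 :: pre') _).mpr htpre]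
        simp [pvOcc]
      have hjmem : (((spre0.length : Nat) : Int) + ((c0 :: pre').length : Int)) ∈ pos.getD t [] :=
        (hinv t).mem_iff.mpr (by rw [hjl]; exact List.mem_cons_self)
      -- min(pos[t]) is the first-occurrence slot
      have hminval : PySem.List.min? (pos.getD t []) (fun q => q)
          = some (((spre0.length : Nat) : Int) + ((c0 :: pre').length : Int)) := by
        cases hmo : PySem.List.min? (pos.getD t []) (fun q => q) with
        | none =>
          exact absurd ((PySem.List.min?_eq_none_iff _ _).mp hmo)
            (List.ne_nil_of_mem hjmem)
        | some m =>
          have hmle : m ≤ ((spre0.length : Nat) : Int) + ((c0 :: pre').length : Int) :=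
            PySem.List.min?_id_le hmo _ hjmem
          have hmmem := (hinv t).mem_iff.mp (PySem.List.min?_mem hmo)
          rw [hjl] at hmmem
          rcases List.mem_cons.mp hmmem with rfl | hmtail
          · rfl
          · have := (pvOcc_bounds t suf _ m hmtail).1
            omega
      rw [hminval]
      dsimp only
      -- the character at slot i and its slot list
      have hocc0 : pvOcc c0 ((spre0.length : Nat) : Int) (c0 :: Lt)
          = ((spre0.length : Nat) : Int) :: pvOcc c0 (((spre0.length : Nat) : Int) + 1) Lt := by
        simp [pvOcc]
      have hcont : pos.contains c0 = true := by
        by_contra hcc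
        have h := hinv c0
        rw [PySem.Dict.getD_of_not_contains _ _ (Bool.not_eq_true _ ▸ hcc)] at h
        have := h.length_eq
        rw [hocc0] at this
        simp at this
      obtain ⟨ps0, hps0⟩ : ∃ ps0, pos.get? c0 = some ps0 := by
        have := PySem.Dict.contains_eq_isSome_get? pos c0
        rw [hcont] at this
        exact Option.isSome_iff_exists.mp this.symm
      have hgd0 : pos.getD c0 [] = ps0 := PySem.Dict.getD_of_get?_eq_some _ _ hps0
      have hps0perm : ps0.Perm (((spre0.length : Nat) : Int) :: pvOcc c0 (((spre0.length : Nat) : Int) + 1) Lt) := by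
        have h := hinv c0
        rw [hgd0, hocc0] at h
        exact h
      have hImem : ((spre0.length : Nat) : Int) ∈ ps0 :=
        hps0perm.mem_iff.mpr List.mem_cons_self
      -- the relabel loop finds exactly the entry of c0
      have hfind : pos.items.find? (fun cps => decide (((spre0.length : Nat) : Int) ∈ cps.2))
          = some (c0, ps0) := by
        cases hf : pos.items.find? (fun cps => decide (((spre0.length : Nat) : Int) ∈ cps.2)) with
        | none =>
          have h1 := List.find?_eq_none.mp hf (c0, ps0) (PySem.Dict.mem_items_of_get?_eq_some _ hps0)
          simp only [decide_eq_true_eq] at h1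
          exact absurd hImem h1
        | some cps =>
          obtain ⟨c1, ps1⟩ := cps
          have hp : ((spre0.length : Nat) : Int) ∈ ps1 := by
            simpa using List.find?_some hf
          have hget1 : pos.get? c1 = some ps1 :=
            PySem.Dict.get?_of_mem_items _ (List.mem_of_find?_eq_some hf) hnd
          have hc1 : c0 = c1 := by
            apply (mem_pvOcc_head_iff c1 c0 Lt ((spre0.length : Nat) : Int)).mp
            apply (hinv c1).mem_iff.mp
            rw [PySem.Dict.getD_of_get?_eq_some _ _ hget1]
            exact hp
          subst hc1
          rw [hps0] at hget1
          rw [Option.some_inj.mp hget1]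
      rw [hfind]
      dsimp only
      -- the slot list of c0, split at slot i
      obtain ⟨k', hk'⟩ : ∃ k', PySem.List.index? ps0 ((spre0.length : Nat) : Int) = some k' :=
        Option.isSome_iff_exists.mp ((PySem.List.index?_isSome_iff _ _).mpr hImem)
      obtain ⟨u, w, hps0dec, hk'len, hInotu⟩ := (PySem.List.index?_eq_some_iff _ _ _).mp hk'
      rw [hk']
      dsimp only
      have hsetu : ps0.set k' (((spre0.length : Nat) : Int) + ((c0 :: pre').length : Int))
          = u ++ (((spre0.length : Nat) : Int) + ((c0 :: pre').length : Int)) :: w := by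
        rw [hps0dec, ← hk'len, pv_set_mid]
      -- removing the matched slot from pos[t]
      have hgdt1 : (pos.insert c0 (u ++ (((spre0.length : Nat) : Int) + ((c0 :: pre').length : Int)) :: w)).getD t []
          = pos.getD t [] :=
        PySem.Dict.getD_insert_of_ne _ _ _ (fun h => hc0 h.symm)
      rw [hsetu, hgdt1, PySem.List.remove?_eq_some_erase _ _ hjmem]
      dsimp only
      -- A's inner scan in closed form
      have hFeq : spre0 ++ c0 :: Lt = spre0 ++ (c0 :: pre') ++ t :: suf := by rw [hLt]; simp
      have hinner := pvALoop_eq n t c0 spre0.length (c0 :: pre') htpre spre0 suf 1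
        (by simp)
        (by rw [← hFeq, List.getElem?_append_right (le_refl _)]; simp)
        (by rw [hn, ← hFeq]; simp only [List.length_append, List.length_cons] at hlen ⊢; omega)
      rw [hFeq, hinner]
      dsimp only
      have hset : ((spre0 ++ (c0 :: pre') ++ t :: suf).set spre0.length t).set
          (spre0.length + (c0 :: pre').length) c0 = (spre0 ++ [t]) ++ (pre' ++ c0 :: suf) := by
        have h1 : spre0 ++ (c0 :: pre') ++ t :: suf = spre0 ++ c0 :: (pre' ++ t :: suf) := by simp
        rw [h1, pv_set_mid]
        have h2 : spre0 ++ t :: (pre' ++ t :: suf) = (spre0 ++ t :: pre') ++ t :: suf := by simp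
        have h3 : spre0.length + (c0 :: pre').length = (spre0 ++ t :: pre').length := by simp
        rw [h2, h3, pv_set_mid]
        simp
      rw [hset]
      -- the two counts agree: same multiset of factors
      have hperm_pos : ((pos.items.filter (fun cps => decide (cps.1 < t))).flatMap
            (fun cps => cps.2.filter (fun q =>
              decide (q < ((spre0.length : Nat) : Int) + ((c0 :: pre').length : Int))))).Perm
          (((PySem.List.enumerate (c0 :: pre') ((spre0.length : Nat) : Int)).filter
              (fun p => decide (p.2 < t))).map (·.1)) := by
        have h1 : ((pos.items.filter (fun cps => decide (cps.1 < t))).flatMap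
              (fun cps => cps.2.filter (fun q =>
                decide (q < ((spre0.length : Nat) : Int) + ((c0 :: pre').length : Int))))).Perm
            ((pos.items.filter (fun cps => decide (cps.1 < t))).flatMap
              (fun cps => pvOcc cps.1 ((spre0.length : Nat) : Int) (c0 :: pre'))) := by
          apply List.Perm.flatMap_left
          intro cps hcps
          obtain ⟨c1, ps1⟩ := cps
          have hmemit : (c1, ps1) ∈ pos.items := List.mem_of_mem_filter hcps
          have hget1 : pos.get? c1 = some ps1 := PySem.Dict.get?_of_mem_items _ hmemit hnd
          have hp1 : ps1.Perm (pvOcc c1 ((spre0.length : Nat) : Int) (c0 :: Lt)) := by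
            have h := hinv c1
            rwa [PySem.Dict.getD_of_get?_eq_some _ _ hget1] at h
          have h2 := hp1.filter (fun q =>
            decide (q < ((spre0.length : Nat) : Int) + ((c0 :: pre').length : Int)))
          refine h2.trans ?_
          rw [show c0 :: Lt = (c0 :: pre') ++ t :: suf by simp [hLt]]
          rw [pvOcc_filter_lt]
        have h2 : (pos.items.filter (fun cps => decide (cps.1 < t))).flatMap
              (fun cps => pvOcc cps.1 ((spre0.length : Nat) : Int) (c0 :: pre'))
            = (pos.keys.filter (fun c => decide (c < t))).flatMap
              (fun c => pvOcc c ((spre0.length : Nat) : Int) (c0 :: pre')) := by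
          have hkeys : pos.keys = pos.items.map (·.1) := rfl
          rw [hkeys, List.filter_map, List.flatMap_map]
          rfl
        have h3 := pv_union (c0 :: pre') ((spre0.length : Nat) : Int)
          (pos.keys.filter (fun c => decide (c < t))) (hnd.filter _)
        have h4 : (PySem.List.enumerate (c0 :: pre') ((spre0.length : Nat) : Int)).filter
              (fun p => decide (p.2 ∈ pos.keys.filter (fun c => decide (c < t))))
            = (PySem.List.enumerate (c0 :: pre') ((spre0.length : Nat) : Int)).filter
              (fun p => decide (p.2 < t)) := by
          apply List.filter_congr
          intro p hp
          have hp2 : p.2 ∈ c0 :: pre' := by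
            obtain ⟨kk, hkk, rfl⟩ := (PySem.List.mem_enumerate_iff _ _ _).mp hp
            exact List.getElem_mem hkk
          by_cases hlt2 : p.2 < t
          · simp only [hlt2, decide_true]
            have hmemL : p.2 ∈ c0 :: Lt := by
              rw [show c0 :: Lt = (c0 :: pre') ++ t :: suf by simp [hLt]]
              exact List.mem_append_left _ hp2
            have hcont2 : pos.contains p.2 = true := by
              by_contra hcc
              have h := hinv p.2
              rw [PySem.Dict.getD_of_not_contains _ _ (Bool.not_eq_true _ ▸ hcc)] at h
              have hne : pvOcc p.2 ((spre0.length : Nat) : Int) (c0 :: Lt) ≠ [] := by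
                intro hh
                exact (pvOcc_eq_nil_iff _ _ _).mp hh hmemL
              exact hne (List.Perm.eq_nil h.symm)
            simp only [decide_eq_true_eq]
            exact List.mem_filter.mpr
              ⟨(PySem.Dict.contains_iff_mem_keys _ _).mp hcont2, by simpa using hlt2⟩
          · simp only [hlt2, decide_false]
            simp only [decide_eq_false_iff_not]
            intro hmf
            exact hlt2 (by simpa using (List.mem_filter.mp hmf).2)
        refine h1.trans ?_
        rw [h2, ← h4]
        exact h3
      have hone : (1 : Int) % 1000000007 = 1 := by norm_num
      have hcntA := pv_fold_abs n t (PySem.List.enumerate (c0 :: pre') ((spre0.length : Nat) : Int)) 1 hone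
      have hcntB := pv_fold_items n (((spre0.length : Nat) : Int) + ((c0 :: pre').length : Int)) t pos.items
        (PySem.Int.mod (n - (((spre0.length : Nat) : Int) + ((c0 :: pre').length : Int)) + 1) 1000000007)
        (by rw [pv_modM]; exact Int.emod_emod_of_dvd _ (dvd_refl _))
      have hprod : (((PySem.List.enumerate (c0 :: pre') ((spre0.length : Nat) : Int)).filter
              (fun p => decide (p.2 < t))).map (fun p => n - p.1 + 1)).prod
          = (((pos.items.filter (fun cps => decide (cps.1 < t))).flatMap
              (fun cps => cps.2.filter (fun q =>
                decide (q < ((spre0.length : Nat) : Int) + ((c0 :: pre').length : Int))))).map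
              (fun q => n - q + 1)).prod := by
        have := (hperm_pos.map (fun q => n - q + 1)).prod_eq
        rw [this, List.map_map]
        rfl
      have hcnt : PySem.Int.mod
            ((PySem.List.enumerate (c0 :: pre') ((spre0.length : Nat) : Int)).foldl (pvAbsStep n t) 1
              * (n - ((spre0.length + (c0 :: pre').length : Nat) : Int) + 1)) 1000000007
          = pos.items.foldl
              (fun a cps => if cps.1 < t then
                  cps.2.foldl (fun a q =>
                    if q < ((spre0.length : Nat) : Int) + ((c0 :: pre').length : Int) then
                      PySem.Int.mod (a * (n - q + 1)) 1000000007 else a) a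
                else a)
              (PySem.Int.mod (n - (((spre0.length : Nat) : Int) + ((c0 :: pre').length : Int)) + 1) 1000000007) := by
        rw [hcntA, hcntB, pv_modM, pv_modM, pv_mm, pv_mm, one_mul]
        rw [hprod]
        have hc : ((spre0.length + (c0 :: pre').length : Nat) : Int)
            = ((spre0.length : Nat) : Int) + ((c0 :: pre').length : Int) := by push_cast; ring
        rw [hc, mul_comm]
      rw [hcnt]
      -- the dict invariant for the next step
      have hinv' : ∀ c : Char,
          (((pos.insert c0 (u ++ (((spre0.length : Nat) : Int) + ((c0 :: pre').length : Int)) :: w)).insert t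
              ((pos.getD t []).erase (((spre0.length : Nat) : Int) + ((c0 :: pre').length : Int)))).getD c []).Perm
            (pvOcc c (((spre0 ++ [t]).length : Nat) : Int) (pre' ++ c0 :: suf)) := by
        intro c
        have hlen1 : (((spre0 ++ [t]).length : Nat) : Int) = ((spre0.length : Nat) : Int) + 1 := by simp
        have hoff : ((spre0.length : Nat) : Int) + 1 + (pre'.length : Int)
            = ((spre0.length : Nat) : Int) + ((c0 :: pre').length : Int) := by
          simp only [List.length_cons]; push_cast; ring
        rw [hlen1]
        by_cases hct : c = t
        · subst hct
          rw [PySem.Dict.getD_insert_self]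
          have h1 := (hinv c).erase (((spre0.length : Nat) : Int) + ((c0 :: pre').length : Int))
          rw [hjl] at h1
          rw [List.erase_cons_head] at h1
          refine h1.trans ?_
          rw [pvOcc_append,
            (pvOcc_eq_nil_iff c pre' _).mpr (fun hm => htpre (List.mem_cons_of_mem _ hm)),
            List.nil_append, pvOcc_cons_ne _ _ _ _ hc0, hoff]
        · rw [PySem.Dict.getD_insert_of_ne _ _ _ hct]
          by_cases hcc0 : c = c0
          · subst hcc0
            rw [PySem.Dict.getD_insert_self]
            have huw : (u ++ w).Perm (pvOcc c (((spre0.length : Nat) : Int) + 1) Lt) :=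
              (List.perm_middle.symm.trans (hps0dec ▸ hps0perm)).cons_inv
            have h1 : (u ++ (((spre0.length : Nat) : Int) + ((c :: pre').length : Int)) :: w).Perm
                ((((spre0.length : Nat) : Int) + ((c :: pre').length : Int)) :: pvOcc c (((spre0.length : Nat) : Int) + 1) Lt) :=
              List.perm_middle.trans (huw.cons _)
            refine h1.trans ?_
            rw [hLt, pvOcc_append, pvOcc_append]
            have h2 : pvOcc c (((spre0.length : Nat) : Int) + 1 + (pre'.length : Int)) (t :: suf)
                = pvOcc c ((((spre0.length : Nat) : Int) + ((c :: pre').length : Int)) + 1) suf := by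
              rw [pvOcc_cons_ne _ _ _ _ (fun h => hc0 h.symm), hoff]
            have h3 : pvOcc c (((spre0.length : Nat) : Int) + 1 + (pre'.length : Int)) (c :: suf)
                = (((spre0.length : Nat) : Int) + ((c :: pre').length : Int))
                  :: pvOcc c ((((spre0.length : Nat) : Int) + ((c :: pre').length : Int)) + 1) suf := by
              rw [pvOcc_cons_self, hoff]
            rw [h2, h3]
            exact List.perm_middle.symm
          · rw [PySem.Dict.getD_insert_of_ne _ _ _ hcc0]
            have h1 := hinv c
            have h2 : pvOcc c ((spre0.length : Nat) : Int) (c0 :: Lt)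
                = pvOcc c (((spre0.length : Nat) : Int) + 1) Lt := by
              simp only [pvOcc]
              rw [if_neg (by rintro rfl; exact hcc0 rfl)]
            rw [h2, hLt, pvOcc_append] at h1
            refine h1.trans ?_
            rw [pvOcc_append]
            have h3 : pvOcc c (((spre0.length : Nat) : Int) + 1 + (pre'.length : Int)) (t :: suf)
                = pvOcc c (((spre0.length : Nat) : Int) + 1 + (pre'.length : Int) + 1) suf := by
              simp only [pvOcc]
              rw [if_neg (by rintro rfl; exact hct rfl)]
            have h4 : pvOcc c (((spre0.length : Nat) : Int) + 1 + (pre'.length : Int)) (c0 :: suf)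
                = pvOcc c (((spre0.length : Nat) : Int) + 1 + (pre'.length : Int) + 1) suf := by
              simp only [pvOcc]
              rw [if_neg (by rintro rfl; exact hcc0 rfl)]
            rw [h3, h4]
      have hstep := ih (spre0 ++ [t]) (pre' ++ c0 :: suf)
        ((pos.insert c0 (u ++ (((spre0.length : Nat) : Int) + ((c0 :: pre').length : Int)) :: w)).insert t
          ((pos.getD t []).erase (((spre0.length : Nat) : Int) + ((c0 :: pre').length : Int))))
        (PySem.Int.mod (res + pos.items.foldl
          (fun a cps => if cps.1 < t then
              cps.2.foldl (fun a q =>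
                if q < ((spre0.length : Nat) : Int) + ((c0 :: pre').length : Int) then
                  PySem.Int.mod (a * (n - q + 1)) 1000000007 else a) a
            else a)
          (PySem.Int.mod (n - (((spre0.length : Nat) : Int) + ((c0 :: pre').length : Int)) + 1) 1000000007)) 1000000007)
        (by simpa using hdrop1)
        (by simp [hLt] at hlen ⊢; omega)
        (((hperm.trans (by rw [hLt]; exact List.perm_middle (a := t) (l₁ := c0 :: pre') (l₂ := suf))).cons_inv).trans List.perm_middle.symm)
        (PySem.Dict.nodup_keys_insert _ _ _ (PySem.Dict.nodup_keys_insert _ _ _ hnd))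
        hinv'
      simpa using hstep


-- the built dict holds exactly the occurrence lists of the sorted array
lemma pv_enum_occ (c : Char) : ∀ (L : List Char) (i : Int),
    (((PySem.List.enumerate L i).map Prod.swap).filter (fun p => p.1 == c)).map (·.2)
      = pvOcc c i L := by
  intro L
  induction L with
  | nil => intro i; simp [PySem.List.enumerate_nil, pvOcc]
  | cons x xs ih =>
    intro i
    rw [PySem.List.enumerate_cons]
    simp only [List.map_cons, Prod.swap_prod_mk, List.filter_cons]
    by_cases hx : x = c
    · subst hx
      simp only [beq_self_eq_true, if_true, List.map_cons, ih (i+1), pvOcc_cons_self]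
    · rw [if_neg (by simpa using hx), ih (i+1), pvOcc_cons_ne _ _ _ _ hx]

lemma pv_init_getD (L : List Char) (c : Char) :
    (pvBInit (PySem.List.enumerate L 0)).getD c [] = pvOcc c 0 L := by
  unfold pvBInit
  have he : (PySem.List.enumerate L 0).foldl
        (fun d rc => d.modify rc.2 [] (fun v => v ++ [rc.1])) PySem.Dict.empty
      = ((PySem.List.enumerate L 0).map Prod.swap).foldl
        (fun d p => d.modify p.1 [] (fun v => v ++ [p.2])) PySem.Dict.empty :=
    (List.foldl_map (f := Prod.swap)
      (g := fun d (p : Char × Int) => d.modify p.1 [] (fun v => v ++ [p.2]))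
      (l := PySem.List.enumerate L 0) (init := PySem.Dict.empty)).symm
  rw [he, PySem.Dict.getD_foldl_modify_append, pv_enum_occ c L 0]
  simp

lemma pv_init_nodup (L : List Char) : (pvBInit (PySem.List.enumerate L 0)).keys.Nodup := by
  unfold pvBInit
  exact PySem.Dict.nodup_keys_foldl_modify_key _ (fun rc : Int × Char => rc.2) []
    (fun _ rc => (fun v => v ++ [rc.1])) PySem.Dict.empty PySem.Dict.nodup_keys_empty

-- ===== VERDICT (by name: the statement is the Claim_ definition above) =====
theorem makeStringSorted_spec : Claim_equal_makeStringSorted := by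
  intro s _
  unfold Spec_makeStringSorted makeStringSorted makeStringSorted_alt
  have h := pv_main s.toList (PySem.Str.len s) (by simp [PySem.Str.len_eq])
    s.toList [] (PySem.List.sorted s.toList (fun c => c) false)
    (pvBInit (PySem.List.enumerate (PySem.List.sorted s.toList (fun c => c) false) 0)) 0
    rfl
    (by simp [(PySem.List.sorted_perm s.toList (fun c => c) false).length_eq])
    (PySem.List.sorted_perm s.toList (fun c => c) false).symm
    (pv_init_nodup _)
    (fun c => by
      simp only [List.length_nil, Nat.cast_zero]
      rw [pv_init_getD])
  simpa using h
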